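-- pv_equiv track=rewrite | github.com/jyb2605/jackkong_algo | 20200524/jaeyeonlee0621_팰린드롬_만들기.py | solution
-- ===== SOURCE A (Python) =====
-- import string
--
-- def solution(name):
--     alphabet = [0 for _ in range(27)]
--     name = name[:-1]
--
--     for n in name:
--         alphabet[string.ascii_uppercase.index(n)] += 1
--
--     answer = []
--     middle = ''
--     count = 0
--     for index in range(27):
--         if alphabet[index] % 2 == 1:
--             if count > 1:
--                 return "I'm Sorry Hansoo"
--             count += 1
--             middle = string.ascii_uppercase[index]
--             alphabet[index] -= 1
--
--     for index in range(27):
--         if alphabet[index] > 0: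
--             answer.append(string.ascii_uppercase[index])
--     if middle:
--         answer.append(middle)
--     for index in range(26, -1, -1):
--         if alphabet[index] > 0:
--             answer.append(string.ascii_uppercase[index])
--     return ''.join(answer)
-- ===== SOURCE B (Python) =====
-- import string
--
-- def solution(name):
--     s = sorted(name[:-1], key=string.ascii_uppercase.index)
--     odds = []
--     half = []
--     i, n = 0, len(s)
--     while i < n:
--         j = i
--         while j < n and s[j] == s[i]:
--             j += 1
--         run = j - i
--         if run % 2 == 1:
--             odds.append(s[i])
--         if run >= 2:
--             half.append(s[i])
--         i = j
--     if len(odds) > 2: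
--         return "I'm Sorry Hansoo"
--     middle = odds[-1] if odds else ''
--     h = ''.join(half)
--     return h + middle + h[::-1]
-- ===== Notes on version B (the rewrite author's own statement) =====
-- stated objective: alternative
-- what changed: B sorts the letters of name[:-1] in alphabet order and does one run-length scan over the sorted list (a run of length >= 2 contributes its letter to the half, an odd-length run marks its letter odd, tolerating up to two), then assembles half + middle + reversed half, replacing A's 27-slot tally array and its three separate alphabet-index loops with early return.
import Mathlib
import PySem

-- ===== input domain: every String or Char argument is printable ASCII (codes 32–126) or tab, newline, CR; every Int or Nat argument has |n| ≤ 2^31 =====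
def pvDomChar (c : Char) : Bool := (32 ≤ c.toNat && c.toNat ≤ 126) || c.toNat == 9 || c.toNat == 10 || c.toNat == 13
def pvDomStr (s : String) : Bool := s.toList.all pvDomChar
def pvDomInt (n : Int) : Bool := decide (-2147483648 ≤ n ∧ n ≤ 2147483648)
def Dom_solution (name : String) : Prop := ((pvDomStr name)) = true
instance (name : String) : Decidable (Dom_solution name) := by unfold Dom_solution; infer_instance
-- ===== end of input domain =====

-- B sorts the letters of name[:-1] and does ONE run-length scan over the sorted list (a run of
-- length >= 2 puts its letter in the half, an odd run marks its letter odd), then assembles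
-- half ++ middle ++ reversed half — replacing A's 27-slot tally array and its three separate
-- alphabet-index loops (objective: alternative algorithm, sort-then-scan instead of counting).

-- string.ascii_uppercase
def upperL : List Char :=
  ['A','B','C','D','E','F','G','H','I','J','K','L','M','N','O','P','Q','R','S','T','U','V','W','X','Y','Z']

-- ===== PORT A =====
-- 'for n in name: alphabet[string.ascii_uppercase.index(n)] += 1'; none = ValueError
def aTally : List Char → List Int → Option (List Int)
  | [], alpha => some alpha
  | c :: rest, alpha =>
    match PySem.List.index? upperL c with
    | none => none
    | some i => aTally rest (alpha.set i (alpha.getD i 0 + 1))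

-- the 'for index in range(27)' odd-count loop; none = early return "I'm Sorry Hansoo"
-- (string.ascii_uppercase[index] ported as upperL.getD index '?': reachable only with index < 26)
def aOdd : List Nat → List Int → List Char → Nat → Option (List Int × List Char)
  | [], alpha, mid, _ => some (alpha, mid)
  | i :: rest, alpha, mid, cnt =>
    if PySem.Int.mod (alpha.getD i 0) 2 = 1 then
      if cnt > 1 then none
      else aOdd rest (alpha.set i (alpha.getD i 0 - 1)) [upperL.getD i '?'] (cnt + 1)
    else aOdd rest alpha mid cnt

def solution (name : String) : String :=
  let s := PySem.List.slice name.toList none (some (-1))   -- name = name[:-1]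
  match aTally s (List.replicate 27 0) with
  | none => ""   -- Python raises ValueError here; excluded by Pre_solution
  | some alpha =>
    match aOdd (List.range 27) alpha [] 0 with
    | none => "I'm Sorry Hansoo"
    | some (alpha2, mid) =>
      -- answer list built by the two index loops (range(26,-1,-1) is range(27) reversed) and ''.join
      let ans1 := (List.range 27).foldl
        (fun acc i => if 0 < alpha2.getD i 0 then acc ++ [upperL.getD i '?'] else acc) ([] : List Char)
      let ans2 := if mid.isEmpty then ans1 else ans1 ++ mid   -- 'if middle: answer.append(middle)'
      let ans3 := ((List.range 27).reverse).foldl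
        (fun acc i => if 0 < alpha2.getD i 0 then acc ++ [upperL.getD i '?'] else acc) ans2
      String.ofList ans3

-- ===== PORT B =====
-- the outer while loop of Source B over the sorted list: each step consumes one maximal run
-- (the inner 'while s[j] == s[i]' is the takeWhile/dropWhile split) and returns (odds, half)
def runScan : List Char → List Char × List Char
  | [] => ([], [])
  | c :: rest =>
    let run := (rest.takeWhile (· == c)).length + 1
    let p := runScan (rest.dropWhile (· == c))
    ((if run % 2 == 1 then [c] else []) ++ p.1,
     (if 2 ≤ run then [c] else []) ++ p.2)
termination_by l => l.length
decreasing_by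
  simp only [List.length_cons]
  have := List.length_dropWhile_le (· == c) rest
  omega

def solution_alt (name : String) : String :=
  -- sorted(name[:-1], key=string.ascii_uppercase.index); the key is ported as toNat-65, exact on
  -- the uppercase letters (everywhere B returns — elsewhere Python's key raises ValueError)
  let s := PySem.List.sorted (PySem.List.slice name.toList none (some (-1))) (fun c => c.toNat - 65) false
  let oh := runScan s                       -- (odds, half)
  if 2 < oh.1.length then "I'm Sorry Hansoo"
  else
    let middle : List Char := match oh.1.getLast? with | some c => [c] | none => []  -- odds[-1] if odds else ''
    String.ofList (oh.2 ++ middle ++ oh.2.reverse)   -- h + middle + h[::-1]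

-- ===== PRECONDITION & SPEC =====
-- Pre_ excludes names whose name[:-1] contains a character that is not an uppercase ASCII letter: A raises ValueError there (and B does too).
def Pre_solution (name : String) : Prop :=
  name.toList.dropLast.all (fun c => 64 < c.toNat && c.toNat < 91) = true
instance (name : String) : Decidable (Pre_solution name) := by unfold Pre_solution; infer_instance
def pvWitness_solution : String := "AABBC"

def Spec_solution (name : String) (out : String) : Prop := out = solution_alt name
instance (name : String) (out : String) : Decidable (Spec_solution name out) := by unfold Spec_solution; infer_instance

-- ===== CLAIM (what is proved, stated in full; the proofs are below) =====
def Claim_equal_solution : Prop := ∀ (name : String), Dom_solution name → Pre_solution name → Spec_solution name (solution name)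

-- ===== LEMMAS AND PROOFS =====

-- index of an uppercase letter in upperL
def uidx (c : Char) : Nat := c.toNat - 65

lemma mem_upper_of_range (c : Char) (h1 : 65 ≤ c.toNat) (h2 : c.toNat ≤ 90) : c ∈ upperL := by
  have hc : c = Char.ofNat c.toNat := (Char.ofNat_toNat c).symm
  interval_cases h : c.toNat <;> (rw [hc]; decide)

lemma upper_index (c : Char) (hc : c ∈ upperL) :
    PySem.List.index? upperL c = some (uidx c) ∧ uidx c < 26 := by
  fin_cases hc <;> decide

lemma upper_getD (i : Nat) (hi : i < 26) :
    upperL.getD i '?' ∈ upperL ∧ uidx (upperL.getD i '?') = i := by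
  interval_cases i <;> decide

lemma upper_roundtrip (c : Char) (hc : c ∈ upperL) : upperL.getD (uidx c) '?' = c := by
  fin_cases hc <;> decide

lemma upper_eq_map_range : upperL = (List.range 26).map (fun i => upperL.getD i '?') := by decide

lemma upper_pairwise : upperL.Pairwise (· < ·) := by decide

lemma upper_bounds (c : Char) (hc : c ∈ upperL) : 65 ≤ c.toNat ∧ c.toNat ≤ 90 := by
  fin_cases hc <;> decide

lemma char_le_of_toNat_le {a b : Char} (h : a.toNat ≤ b.toNat) : a ≤ b := by
  rw [Char.le_def, UInt32.le_iff_toNat_le]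
  exact h

-- getD after set, within range
lemma getD_set (l : List Int) (j : Nat) (v : Int) (i : Nat) (hj : j < l.length) :
    (l.set j v).getD i 0 = if j = i then v else l.getD i 0 := by
  by_cases h : j = i
  · subst h; simp [List.getD_eq_getElem?_getD, hj]
  · simp [List.getD_eq_getElem?_getD, h]

lemma aTally_spec (s : List Char) (h : ∀ c ∈ s, c ∈ upperL) :
    ∀ alpha : List Int, alpha.length = 27 →
      ∃ alpha', aTally s alpha = some alpha' ∧ alpha'.length = 27 ∧
        ∀ i : Nat, alpha'.getD i 0 = alpha.getD i 0 + ((s.filter (fun c => uidx c == i)).length : Int) := by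
  induction s with
  | nil => intro alpha hl; exact ⟨alpha, rfl, hl, by simp⟩
  | cons c rest ih =>
    intro alpha hl
    obtain ⟨hidx, hlt⟩ := upper_index c (h c (by simp))
    have hrest : ∀ x ∈ rest, x ∈ upperL := fun x hx => h x (by simp [hx])
    obtain ⟨alpha', h1, h2, h3⟩ := ih hrest (alpha.set (uidx c) (alpha.getD (uidx c) 0 + 1))
      (by simp [hl])
    refine ⟨alpha', ?_, h2, ?_⟩
    · simp only [aTally, hidx]; exact h1
    · intro i
      rw [h3 i, getD_set _ _ _ _ (by omega), List.filter_cons]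
      by_cases hci : uidx c = i
      · simp [hci]; ring
      · simp [hci]

lemma aOdd_spec (l : List Nat) (hnd : l.Nodup) :
    ∀ (alpha : List Int) (mid : List Char) (cnt : Nat), (∀ i ∈ l, i < alpha.length) →
      (3 ≤ min cnt 2 + (l.filter (fun i => PySem.Int.mod (alpha.getD i 0) 2 == 1)).length →
         aOdd l alpha mid cnt = none) ∧
      (min cnt 2 + (l.filter (fun i => PySem.Int.mod (alpha.getD i 0) 2 == 1)).length < 3 →
         ∃ alpha', aOdd l alpha mid cnt =
             some (alpha',
               (((l.filter (fun i => PySem.Int.mod (alpha.getD i 0) 2 == 1)).getLast?).map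
                 (fun i => [upperL.getD i '?'])).getD mid) ∧
           alpha'.length = alpha.length ∧
           ∀ j : Nat, alpha'.getD j 0 = alpha.getD j 0 -
             (if j ∈ l.filter (fun i => PySem.Int.mod (alpha.getD i 0) 2 == 1) then 1 else 0)) := by
  induction l with
  | nil =>
    intro alpha mid cnt _
    constructor
    · intro h3; simp only [List.filter_nil, List.length_nil] at h3; omega
    · intro _; exact ⟨alpha, by simp [aOdd], rfl, by simp⟩
  | cons i rest ih =>
    intro alpha mid cnt hlen
    have hi : i < alpha.length := hlen i (by simp)
    have hirest : i ∉ rest := (List.nodup_cons.mp hnd).1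
    have hndrest : rest.Nodup := (List.nodup_cons.mp hnd).2
    by_cases hodd : PySem.Int.mod (alpha.getD i 0) 2 = 1
    · -- odd at i
      rw [List.filter_cons_of_pos (by simpa using hodd)]
      by_cases hc : cnt > 1
      · constructor
        · intro _; simp only [aOdd, if_pos hodd, if_pos hc]
        · intro hlt; exfalso; simp only [List.length_cons] at hlt; omega
      · -- recurse with set
        have hpredeq : ∀ x ∈ rest,
            (PySem.Int.mod ((alpha.set i (alpha.getD i 0 - 1)).getD x 0) 2 == 1)
              = (PySem.Int.mod (alpha.getD x 0) 2 == 1) := by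
          intro x hx
          rw [getD_set _ _ _ _ hi, if_neg (fun he : i = x => hirest (he ▸ hx))]
        have hfeq : rest.filter (fun x => PySem.Int.mod ((alpha.set i (alpha.getD i 0 - 1)).getD x 0) 2 == 1)
            = rest.filter (fun x => PySem.Int.mod (alpha.getD x 0) 2 == 1) :=
          List.filter_congr hpredeq
        obtain ⟨ihn, ihs⟩ := ih hndrest (alpha.set i (alpha.getD i 0 - 1)) [upperL.getD i '?'] (cnt + 1)
          (by intro x hx; rw [List.length_set]; exact hlen x (by simp [hx]))
        rw [hfeq] at ihn ihs
        constructor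
        · intro h3
          simp only [aOdd, if_pos hodd, if_neg hc]
          exact ihn (by simp at h3 ⊢; omega)
        · intro hlt
          obtain ⟨alpha', he, hl', hpt⟩ := ihs (by simp at hlt ⊢; omega)
          refine ⟨alpha', ?_, by rw [hl', List.length_set], ?_⟩
          · simp only [aOdd, if_pos hodd, if_neg hc]
            rw [he]
            have hmid : ((rest.filter (fun x => PySem.Int.mod (alpha.getD x 0) 2 == 1)).getLast?.map
                  (fun i => [upperL.getD i '?'])).getD [upperL.getD i '?']
                = (((i :: rest.filter (fun x => PySem.Int.mod (alpha.getD x 0) 2 == 1)).getLast?).map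
                  (fun i => [upperL.getD i '?'])).getD mid := by
              cases (rest.filter (fun x => PySem.Int.mod (alpha.getD x 0) 2 == 1)) with
              | nil => simp
              | cons a t =>
                rw [List.getLast?_cons_cons]
                cases h : (a::t).getLast? with
                | none => simp at h
                | some b => simp
            rw [hmid]
          · intro j
            rw [hpt j, getD_set _ _ _ _ hi]
            by_cases hji : i = j
            · subst hji
              have hnm : i ∉ rest.filter (fun x => PySem.Int.mod (alpha.getD x 0) 2 == 1) :=
                fun hmem => hirest (List.mem_of_mem_filter hmem)
              rw [if_pos rfl, if_neg hnm,
                if_pos (List.mem_cons_self)]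
              omega
            · rw [if_neg hji]
              by_cases hjf : j ∈ rest.filter (fun x => PySem.Int.mod (alpha.getD x 0) 2 == 1)
              · rw [if_pos hjf, if_pos (List.mem_cons_of_mem _ hjf)]
              · rw [if_neg hjf, if_neg (by
                  intro hm
                  rcases List.mem_cons.mp hm with h | h
                  · exact hji h.symm
                  · exact hjf h)]
    · -- even at i
      rw [List.filter_cons_of_neg (by simpa using hodd)]
      obtain ⟨ihn, ihs⟩ := ih hndrest alpha mid cnt (fun x hx => hlen x (by simp [hx]))
      constructor
      · intro h3; simp only [aOdd, if_neg hodd]; exact ihn h3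
      · intro hlt
        obtain ⟨alpha', he, hl', hpt⟩ := ihs hlt
        exact ⟨alpha', by simp only [aOdd, if_neg hodd]; exact he, hl', hpt⟩

-- ==== B-side lemmas ====

lemma dropWhile_head_not {α : Type} (p : α → Bool) :
    ∀ (l : List α) (d : α) (t : List α), l.dropWhile p = d :: t → p d = false := by
  intro l
  induction l with
  | nil => intro d t h; simp [List.dropWhile] at h
  | cons a l ih =>
    intro d t h
    by_cases hpa : p a = true
    · rw [List.dropWhile_cons_of_pos hpa] at h; exact ih d t h
    · rw [List.dropWhile_cons_of_neg hpa] at h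
      cases h
      simpa using hpa

lemma filter_split (L : List Char) (hL : L.Pairwise (· < ·)) (c : Char) (hc : c ∈ L)
    (p q : Char → Bool) (hlt : ∀ x, x < c → p x = false) (hle : ∀ x, x ≤ c → q x = false)
    (hgt : ∀ x, c < x → p x = q x) :
    L.filter p = (if p c then [c] else []) ++ L.filter q := by
  induction L with
  | nil => cases hc
  | cons a t ih =>
    rcases List.mem_cons.mp hc with rfl | hct
    · have hta : ∀ x ∈ t, c < x := fun x hx => List.rel_of_pairwise_cons hL hx
      have h1 : t.filter p = t.filter q := List.filter_congr (fun x hx => hgt x (hta x hx))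
      rw [List.filter_cons, List.filter_cons, hle c le_rfl, h1]
      cases hpc : p c <;> simp
    · have hac : a < c := List.rel_of_pairwise_cons hL hct
      rw [List.filter_cons, List.filter_cons, hlt a hac, hle a (le_of_lt hac)]
      simpa using ih (List.Pairwise.of_cons hL) hct

lemma runScan_eq : ∀ (n : Nat) (s : List Char), s.length ≤ n → (∀ c ∈ s, c ∈ upperL) →
    s.Pairwise (· ≤ ·) →
    runScan s = (upperL.filter (fun c => s.count c % 2 == 1),
                 upperL.filter (fun c => decide (2 ≤ s.count c))) := by
  intro n
  induction n with
  | zero =>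
    intro s hlen _ _
    have hs : s = [] := List.length_eq_zero_iff.mp (Nat.le_zero.mp hlen)
    subst hs
    simp [runScan]
  | succ n ih =>
    intro s hlen hsub hs
    cases s with
    | nil => simp [runScan]
    | cons c rest =>
      set tw := rest.takeWhile (· == c) with htwdef
      set tl := rest.dropWhile (· == c) with htldef
      have hsplit : tw ++ tl = rest := List.takeWhile_append_dropWhile
      have htw_all : ∀ x ∈ tw, x = c := by
        intro x hx
        have := List.mem_takeWhile_imp hx
        simpa using this
      have hrest_ge : ∀ x ∈ rest, c ≤ x := fun x hx => List.rel_of_pairwise_cons hs hx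
      have htl_pw : tl.Pairwise (· ≤ ·) :=
        (List.Pairwise.of_cons hs).sublist (List.dropWhile_sublist _)
      have htl_sub : ∀ x ∈ tl, x ∈ rest := fun x hx => (List.dropWhile_sublist _).subset hx
      have hgt_tl : ∀ x ∈ tl, c < x := by
        cases htl2 : tl with
        | nil => intro x hx; simp at hx
        | cons d t' =>
          have hd_false : (d == c) = false := by
            apply dropWhile_head_not (· == c) rest d t'
            rw [← htldef]; exact htl2
          have hd_mem : d ∈ rest := htl_sub d (by rw [htl2]; exact List.mem_cons_self)
          have hcd : c < d := lt_of_le_of_ne (hrest_ge d hd_mem)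
            (fun he => by simp [← he] at hd_false)
          intro x hx
          rcases List.mem_cons.mp hx with rfl | hx'
          · exact hcd
          · exact lt_of_lt_of_le hcd
              (List.rel_of_pairwise_cons (htl2 ▸ htl_pw) hx')
      have hcnt_c : (c :: rest).count c = tw.length + 1 := by
        rw [List.count_cons_self, ← hsplit, List.count_append]
        have h1 : tw.count c = tw.length := List.count_eq_length.mpr (fun b hb => (htw_all b hb).symm)
        have h2 : tl.count c = 0 := List.count_eq_zero.mpr (fun hmem => lt_irrefl c (hgt_tl c hmem))
        omega
      have hcnt_ne : ∀ x, x ≠ c → (c :: rest).count x = tl.count x := by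
        intro x hne
        have htwx : tw.count x = 0 := List.count_eq_zero.mpr (fun hmem => hne (htw_all x hmem))
        rw [← hsplit]
        simp [List.count_append, Ne.symm hne, htwx]
      have hmin : ∀ x, x < c → (c :: rest).count x = 0 := by
        intro x hxc
        refine List.count_eq_zero.mpr ?_
        intro hmem
        rcases List.mem_cons.mp hmem with rfl | hmem'
        · exact lt_irrefl x hxc
        · exact absurd (hrest_ge x hmem') (not_le.mpr hxc)
      have htl0 : ∀ x, x ≤ c → tl.count x = 0 :=
        fun x hxc => List.count_eq_zero.mpr (fun hmem => absurd (hgt_tl x hmem) (not_lt.mpr hxc))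
      have hlen' : tl.length ≤ n := by
        have h1 := List.length_dropWhile_le (· == c) rest
        simp only [List.length_cons] at hlen
        rw [htldef]
        omega
      have hsub' : ∀ x ∈ tl, x ∈ upperL :=
        fun x hx => hsub x (List.mem_cons_of_mem _ (htl_sub x hx))
      have ihres := ih tl hlen' hsub' htl_pw
      have hcU : c ∈ upperL := hsub c List.mem_cons_self
      have hunfold : runScan (c :: rest)
          = ((if (tw.length + 1) % 2 == 1 then [c] else []) ++ (runScan tl).1,
             (if 2 ≤ tw.length + 1 then [c] else []) ++ (runScan tl).2) := by
        rw [runScan]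
      rw [hunfold, ihres, Prod.mk.injEq]
      constructor
      · rw [filter_split upperL upper_pairwise c hcU
          (fun x => (c :: rest).count x % 2 == 1) (fun x => tl.count x % 2 == 1)
          (fun x hx => by simp [hmin x hx])
          (fun x hx => by simp [htl0 x hx])
          (fun x hx => by simp only [hcnt_ne x (ne_of_gt hx)])]
        rw [hcnt_c]
      · rw [filter_split upperL upper_pairwise c hcU
          (fun x => decide (2 ≤ (c :: rest).count x)) (fun x => decide (2 ≤ tl.count x))
          (fun x hx => by simp [hmin x hx])
          (fun x hx => by simp [htl0 x hx])
          (fun x hx => by simp only [hcnt_ne x (ne_of_gt hx)])]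
        rw [hcnt_c]
        by_cases h2 : 2 ≤ tw.length + 1 <;> simp [h2]

lemma mod2_cast (k : Nat) : (PySem.Int.mod ((k : Nat) : Int) 2 == 1) = (k % 2 == 1) := by
  have h : PySem.Int.mod ((k : Nat) : Int) 2 = ((k % 2 : Nat) : Int) := by
    exact_mod_cast PySem.Int.mod_natCast k 2
  rw [h]
  rcases Nat.mod_two_eq_zero_or_one k with h0 | h0 <;> simp [h0]

-- ===== VERDICT (by name: the statement is the Claim_ definition above) =====
theorem solution_spec : Claim_equal_solution := by
  intro name _ hpreb
  have hpre : ∀ c ∈ name.toList.dropLast, c ∈ upperL := by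
    intro c hc
    have hb : (name.toList.dropLast.all (fun c => 64 < c.toNat && c.toNat < 91)) = true := hpreb
    have hu := List.all_eq_true.mp hb c hc
    simp only [Bool.and_eq_true, decide_eq_true_eq] at hu
    exact mem_upper_of_range c (by omega) (by omega)
  unfold Spec_solution solution solution_alt
  rw [PySem.List.slice_to_neg_one]
  set s := name.toList.dropLast with hsdef
  -- characterize the B side: sorted list, runScan
  set sb := PySem.List.sorted s (fun c => c.toNat - 65) false with hsbdef
  have hperm : sb.Perm s := PySem.List.sorted_perm s (fun c => c.toNat - 65) false
  have hsbsub : ∀ c ∈ sb, c ∈ upperL := fun c hc => hpre c (hperm.subset hc)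
  have hsbp : sb.Pairwise (· ≤ ·) := by
    have hk : sb.Pairwise (fun a b => a.toNat - 65 ≤ b.toNat - 65) := by
      simpa using PySem.List.sorted_pairwise (xs := s) (key := fun c => c.toNat - 65)
    refine hk.imp_of_mem ?_
    intro a b ha hb hab
    have hba := upper_bounds a (hsbsub a ha)
    have hbb := upper_bounds b (hsbsub b hb)
    exact char_le_of_toNat_le (by omega)
  have hcount_sb : ∀ c, sb.count c = s.count c := fun c => hperm.count_eq c
  have hB := runScan_eq sb.length sb le_rfl hsbsub hsbp
  simp only [hcount_sb] at hB
  -- characterize the A side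
  obtain ⟨alpha, hA, hAl, hAe⟩ := aTally_spec s hpre (List.replicate 27 0) (by simp)
  have hrep : ∀ i : Nat, (List.replicate 27 (0:Int)).getD i 0 = 0 := by
    intro i
    rw [List.getD_eq_getElem?_getD]
    cases h : (List.replicate 27 (0:Int))[i]? with
    | none => rfl
    | some v =>
      have hv := List.eq_of_mem_replicate (List.mem_of_getElem? h)
      simp [hv]
  have hN : ∀ i : Nat, alpha.getD i 0 = ((s.filter (fun c => uidx c == i)).length : Int) := by
    intro i; rw [hAe i, hrep i, zero_add]
  have hcnt : ∀ i ∈ List.range 26, ((s.count (upperL.getD i '?') : Nat) : Int) = alpha.getD i 0 := by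
    intro i hi
    have hi26 : i < 26 := List.mem_range.mp hi
    rw [hN i, List.count_eq_countP]
    have hq : s.countP (· == upperL.getD i '?') = s.countP (fun c => uidx c == i) := by
      apply List.countP_congr
      intro x hx
      have hxu : x ∈ upperL := hpre x hx
      constructor
      · intro hb
        have hx' : x = upperL.getD i '?' := by simpa using hb
        rw [hx', (upper_getD i hi26).2]
        simp
      · intro hb
        have hx' : uidx x = i := by simpa using hb
        have := upper_roundtrip x hxu
        rw [hx'] at this
        simp [← this]
    rw [hq, List.countP_eq_length_filter]
  have h26 : alpha.getD 26 0 = 0 := by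
    rw [hN 26]
    norm_cast
    rw [List.length_eq_zero_iff, List.filter_eq_nil_iff]
    intro c hc
    have := (upper_index c (hpre c hc)).2
    simp [uidx] at this ⊢
    omega
  have hO27 : (List.range 27).filter (fun i => PySem.Int.mod (alpha.getD i 0) 2 == 1)
      = (List.range 26).filter (fun i => PySem.Int.mod (alpha.getD i 0) 2 == 1) := by
    rw [show (27:Nat) = 26 + 1 from rfl, List.range_succ, List.filter_append]
    have hf : (PySem.Int.mod (alpha.getD 26 0) 2 == 1) = false := by rw [h26]; decide
    simp only [List.filter_cons, List.filter_nil, hf, Bool.false_eq_true, if_false,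
      List.append_nil]
  set O := (List.range 26).filter (fun i => PySem.Int.mod (alpha.getD i 0) 2 == 1) with hOdef
  -- B's odds = A's odd-index list, mapped to letters
  have hoddsB : upperL.filter (fun c => s.count c % 2 == 1) = O.map (fun i => upperL.getD i '?') := by
    rw [hOdef]
    conv_lhs => rw [upper_eq_map_range]
    rw [List.filter_map]
    congr 1
    apply List.filter_congr
    intro i hi
    simp only [Function.comp_apply]
    rw [← mod2_cast (s.count (upperL.getD i '?')), hcnt i hi]
  obtain ⟨hnone, hsome⟩ := aOdd_spec (List.range 27) List.nodup_range alpha [] 0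
      (fun i hi => by rw [hAl]; exact List.mem_range.mp hi)
  rw [hO27] at hnone hsome
  simp only []
  rw [hA, hB]
  simp only [hoddsB]
  by_cases hbig : 3 ≤ O.length
  · rw [hnone (by simpa using hbig)]
    simp only []
    rw [if_pos (by rw [List.length_map]; omega)]
  · rw [if_neg (by rw [List.length_map]; omega)]
    obtain ⟨alpha2, hA2, hA2l, hA2e⟩ := hsome (by simp; omega)
    rw [hA2]
    simp only []
    -- B's half = map of A's positive-after-decrement indices
    have hiO_parity : ∀ i, i < 26 →
        (i ∈ O ↔ (PySem.Int.mod (alpha.getD i 0) 2 == 1) = true) := by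
      intro i hi26
      rw [hOdef, List.mem_filter]
      simp [List.mem_range, hi26]
    have hhalfB : upperL.filter (fun c => decide (2 ≤ s.count c))
        = ((List.range 26).filter (fun i => decide (0 < alpha2.getD i 0))).map
            (fun i => upperL.getD i '?') := by
      conv_lhs => rw [upper_eq_map_range]
      rw [List.filter_map]
      congr 1
      apply List.filter_congr
      intro i hi
      have hi26 : i < 26 := List.mem_range.mp hi
      simp only [Function.comp_apply]
      have hk := hcnt i hi
      have ha2 := hA2e i
      by_cases hiO : i ∈ O
      · rw [if_pos hiO] at ha2
        rw [ha2, ← hk]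
        simp only [decide_eq_decide]
        omega
      · rw [if_neg hiO] at ha2
        have heven : s.count (upperL.getD i '?') % 2 = 0 := by
          have hnot := (not_iff_not.mpr (hiO_parity i hi26)).mp hiO
          rw [← hk, mod2_cast] at hnot
          simpa using hnot
        rw [ha2, sub_zero, ← hk]
        simp only [decide_eq_decide]
        omega
    have h26pos : ¬ 0 < alpha2.getD 26 0 := by
      have h26n : 26 ∉ O := fun hm => by
        have := (List.mem_filter.mp (hOdef ▸ hm)).1
        simp at this
      rw [hA2e 26, h26, if_neg h26n]
      norm_num
    have hfw27 : (List.range 27).filter (fun i => decide (0 < alpha2.getD i 0))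
        = (List.range 26).filter (fun i => decide (0 < alpha2.getD i 0)) := by
      rw [show (27:Nat) = 26 + 1 from rfl, List.range_succ, List.filter_append,
        List.filter_cons, if_neg (by simpa using h26pos), List.filter_nil, List.append_nil]
    have hmid : (Option.map (fun i => [upperL.getD i '?']) O.getLast?).getD []
        = (match (List.map (fun i => upperL.getD i '?') O).getLast? with
           | some c => [c] | none => ([] : List Char)) := by
      rw [List.getLast?_map]
      cases O.getLast? <;> simp
    have hif : ∀ (M F : List Char), (if M.isEmpty = true then F else F ++ M) = F ++ M := by
      intro M F; cases M <;> simp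
    rw [PySem.List.foldl_append_ite, PySem.List.foldl_append_ite]
    simp only [List.nil_append]
    rw [List.filter_reverse, List.map_reverse, hfw27, hif, hhalfB, ← hmid]
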